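-- pv_equiv track=rewrite | github.com/daniel-reich/ubiquitous-fiesta | GP6CEr9a5CMqPHY7C_23.py | words_to_sentence
-- ===== SOURCE A (Python) =====
-- def handle_comma(words):
--     s = ""
--     for i in range(0, len(words)):
--       if i == len(words) - 1:
--         s = s[:-2]
--         s += " and " + words[i]
--       else:
--         s += words[i] + ", "
--     return s
--
-- def words_to_sentence(words):
--   if words == None:
--     return ""
--   words = [i for i in words if i != ""]
--   if len(words) == 0:
--     return ""
--   elif len(words) == 2:
--     return words[0] + " and " + words[1]
--   elif len(words) > 2:
--     return handle_comma(words)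
--   else:
--     return words[0]
-- ===== SOURCE B (Python) =====
-- def words_to_sentence(words):
--     if words is None:
--         return ""
--     words = [w for w in words if w != ""]
--     if not words:
--         return ""
--     if len(words) == 1:
--         return words[0]
--     return ", ".join(words[:-1]) + " and " + words[-1]
-- ===== Notes on version B (the rewrite author's own statement) =====
-- stated objective: idiomatic
-- what changed: Replaces the index-loop helper that appends 'word, ' to an accumulator and strips the trailing two characters at the last index, and the separate 2-word branch, with a single slice-and-join expression ', '.join(words[:-1]) + ' and ' + words[-1].
import Mathlib
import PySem

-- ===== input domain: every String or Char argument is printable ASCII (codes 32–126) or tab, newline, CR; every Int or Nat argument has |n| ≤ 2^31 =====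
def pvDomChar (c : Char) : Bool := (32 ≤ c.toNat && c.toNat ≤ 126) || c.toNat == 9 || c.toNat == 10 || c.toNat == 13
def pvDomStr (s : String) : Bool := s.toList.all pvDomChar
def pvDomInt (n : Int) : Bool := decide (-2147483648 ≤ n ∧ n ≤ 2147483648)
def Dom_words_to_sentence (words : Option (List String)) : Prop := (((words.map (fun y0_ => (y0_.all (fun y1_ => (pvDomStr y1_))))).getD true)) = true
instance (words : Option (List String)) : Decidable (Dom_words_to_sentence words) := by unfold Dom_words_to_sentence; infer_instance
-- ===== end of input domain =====

-- B drops the handle_comma index loop (append "word, ", strip the last two chars at the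
-- final index) and the separate 2-word branch, in favour of one slice-and-join expression;
-- objective: idiomatic.

-- ===== PORT A =====
def handle_comma (words : List String) : String :=
  (PySem.List.pyRange 0 (words.length : Int)).foldl
    (fun s i =>
      if i = (words.length : Int) - 1 then
        PySem.Str.slice s none (some (-2)) ++ (" and " ++ PySem.List.pyGetD words i "")
      else
        s ++ (PySem.List.pyGetD words i "" ++ ", "))
    ""

def words_to_sentence (words : Option (List String)) : String :=
  match words with
  | none => ""
  | some ws =>
    let ws := ws.filter (fun i => i ≠ "")
    if ws.length = 0 then ""
    else if ws.length = 2 then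
      PySem.List.pyGetD ws 0 "" ++ (" and " ++ PySem.List.pyGetD ws 1 "")
    else if ws.length > 2 then handle_comma ws
    else PySem.List.pyGetD ws 0 ""

-- ===== PORT B =====
def words_to_sentence_alt (words : Option (List String)) : String :=
  match words with
  | none => ""
  | some ws =>
    let ws := ws.filter (fun w => w ≠ "")
    if ws.isEmpty then ""
    else if ws.length = 1 then PySem.List.pyGetD ws 0 ""
    else
      PySem.Str.join ", " (PySem.List.slice ws none (some (-1))) ++
        (" and " ++ PySem.List.pyGetD ws (-1) "")

-- ===== PRECONDITION & SPEC =====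
def Spec_words_to_sentence (words : Option (List String)) (out : String) : Prop := out = words_to_sentence_alt words
instance (words : Option (List String)) (out : String) : Decidable (Spec_words_to_sentence words out) := by unfold Spec_words_to_sentence; infer_instance

-- ===== CLAIM (what is proved, stated in full; the proofs are below) =====
def Claim_equal_words_to_sentence : Prop := ∀ (words : Option (List String)), Dom_words_to_sentence words → Spec_words_to_sentence words (words_to_sentence words)

-- ===== LEMMAS AND PROOFS =====

-- The concatenation handle_comma's loop builds before its last step: every word followed by ", ".
-- For a nonempty list this is the comma-join plus one trailing ", ".
theorem flatten_commas_eq_join (l : List String) (h : l ≠ []) :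
    (l.map (fun w => w.toList ++ [',', ' '])).flatten
      = PySem.Chars.join [',', ' '] (l.map String.toList) ++ [',', ' '] := by
  induction l with
  | nil => exact absurd rfl h
  | cons a t ih =>
    cases t with
    | nil => simp [PySem.Chars.join_singleton]
    | cons b r =>
      simp only [List.map_cons, List.flatten_cons] at *
      rw [PySem.Chars.join_cons_cons, ih (by simp)]
      simp

-- The loop prefix (indices 0 … m-1 with m+1 ≤ length): the else-branch fires each time.
theorem handle_comma_prefix (ws : List String) (m : Nat) (hm : m + 1 ≤ ws.length) (s0 : String) :
    ((PySem.List.pyRange 0 (m : Int)).foldl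
      (fun s i =>
        if i = (ws.length : Int) - 1 then
          PySem.Str.slice s none (some (-2)) ++ (" and " ++ PySem.List.pyGetD ws i "")
        else
          s ++ (PySem.List.pyGetD ws i "" ++ ", ")) s0).toList
      = s0.toList ++ ((ws.take m).map (fun w => w.toList ++ [',', ' '])).flatten := by
  induction m generalizing s0 with
  | zero => simp
  | succ k ih =>
    have hk : ((k : Int) + 1) = ((k + 1 : Nat) : Int) := by push_cast; ring
    have hne : ¬ ((k : Int) = (ws.length : Int) - 1) := by omega
    rw [← hk, PySem.List.pyRange_one_succ_right (by positivity), List.foldl_append,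
        List.foldl_cons, List.foldl_nil, if_neg hne]
    simp only [String.toList_append]
    rw [ih (by omega) s0]
    have hlt : k < ws.length := by omega
    have htake : List.take (k + 1) ws = List.take k ws ++ [ws[k]] := by
      rw [List.take_add_one]
      simp [List.getElem?_eq_getElem hlt]
    rw [PySem.List.pyGetD_natCast, List.getD_eq_getElem ws "" hlt, htake,
        List.map_append, List.flatten_append]
    simp

-- handle_comma on any list of length ≥ 2 is the comma-join of all but the last word,
-- then " and ", then the last word.
theorem handle_comma_eq (ws : List String) (h : 2 ≤ ws.length) :
    (handle_comma ws).toList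
      = PySem.Chars.join [',', ' '] (ws.dropLast.map String.toList) ++
          ([' ', 'a', 'n', 'd', ' '] ++ (ws.getLast (by rintro rfl; simp at h)).toList) := by
  have hsplit : PySem.List.pyRange 0 (ws.length : Int)
      = PySem.List.pyRange 0 ((ws.length - 1 : Nat) : Int) ++ [((ws.length - 1 : Nat) : Int)] := by
    rw [← PySem.List.pyRange_one_succ_right (by positivity)]
    congr 1
    omega
  unfold handle_comma
  rw [hsplit, List.foldl_append, List.foldl_cons, List.foldl_nil, if_pos (by omega)]
  have hpre := handle_comma_prefix ws (ws.length - 1) (by omega) ""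
  rw [← List.dropLast_eq_take] at hpre
  have hdne : ws.dropLast ≠ [] := by
    intro hd
    have := congrArg List.length hd
    simp at this; omega
  have hP := flatten_commas_eq_join ws.dropLast hdne
  simp only [String.toList_append, PySem.Str.toList_slice, PySem.Chars.slice_eq_listSlice]
  rw [PySem.List.slice_to_neg_ofNat _ 2 (by norm_num)]
  have h0 : ("" : String).toList = [] := by decide
  rw [h0, List.nil_append] at hpre
  rw [hpre, hP]
  have hlenJ :
      (PySem.Chars.join [',', ' '] (ws.dropLast.map String.toList) ++ [',', ' ']).length - 2
        = (PySem.Chars.join [',', ' '] (ws.dropLast.map String.toList)).length := by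
    simp
  rw [hlenJ, List.take_left]
  have hget : PySem.List.pyGetD ws ((ws.length - 1 : Nat) : Int) ""
      = ws.getLast (by rintro rfl; simp at h) := by
    rw [PySem.List.pyGetD_natCast,
        List.getD_eq_getElem ws "" (by omega), List.getLast_eq_getElem]
  rw [hget]
  have : (" and " : String).toList = [' ', 'a', 'n', 'd', ' '] := by decide
  rw [this]

-- ===== VERDICT (by name: the statement is the Claim_ definition above) =====
theorem words_to_sentence_spec : Claim_equal_words_to_sentence := by
  intro words _
  unfold Spec_words_to_sentence words_to_sentence words_to_sentence_alt
  cases words with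
  | none => rfl
  | some ws0 =>
    simp only []
    generalize (ws0.filter (fun w => w ≠ "")) = l
    rcases l with _ | ⟨a, _ | ⟨b, t⟩⟩
    · rfl
    · rfl
    · -- l = a :: b :: t, length ≥ 2
      have hne2 : ¬ ((a :: b :: t).length = 0) := by simp
      have hne1 : ¬ ((a :: b :: t).isEmpty = true) := by simp
      have hlen1 : ¬ ((a :: b :: t).length = 1) := by simp
      rw [if_neg hne2, if_neg hne1, if_neg hlen1]
      rw [← String.toList_inj]
      have hB :
          (PySem.Str.join ", " (PySem.List.slice (a :: b :: t) none (some (-1))) ++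
            (" and " ++ PySem.List.pyGetD (a :: b :: t) (-1) "")).toList
          = PySem.Chars.join [',', ' '] ((a :: b :: t).dropLast.map String.toList) ++
              ([' ', 'a', 'n', 'd', ' '] ++ ((a :: b :: t).getLast (by simp)).toList) := by
        rw [PySem.List.slice_to_neg_one, PySem.List.pyGetD_neg_one _ _ (by simp)]
        simp only [String.toList_append, PySem.Str.toList_join]
        have : (", " : String).toList = [',', ' '] := by decide
        rw [this]
        have : (" and " : String).toList = [' ', 'a', 'n', 'd', ' '] := by decide
        rw [this]
      rw [hB]
      cases t with
      | nil =>
        rw [if_pos (by simp)]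
        simp [PySem.List.pyGetD, PySem.Chars.join_singleton]
      | cons c r =>
        rw [if_neg (by simp), if_pos (by simp)]
        exact handle_comma_eq (a :: b :: c :: r) (by simp)
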